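-- pv_equiv track=rewrite | github.com/cavoq/xsscrapy | xsscrapy/spiders/xss_spider.py | change_params
-- ===== SOURCE A (Python) =====
-- def change_params(params, payload):
--     """Returns a list of complete parameters, each with 1 parameter changed to an XSS vector"""
--     changed_params = []
--     changed_param = False
--     modded_params = []
--     all_modded_params = {}
--
--     # Create a list of lists, each list will be the URL we will test
--     # This preserves the order of the URL parameters and will also
--     # test each parameter individually instead of all at once
--     all_modded_params[payload] = []
--     for x in range(0, len(params)):
--         for p in params:
--             param = p[0]
--             value = p[1]
--             # If a parameter has not been modified yet
--             if param not in changed_params and changed_param == False: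
--                 changed_params.append(param)
--                 p = (param, value+payload)
--                 modded_params.append(p)
--                 changed_param = param
--             else:
--                 modded_params.append(p)
--
--         # Reset so we can step through again and change a diff param
--         # allModdedParams[payload].append(moddedParams)
--         all_modded_params[payload].append(modded_params)
--
--         changed_param = False
--         modded_params = []
--
--     # Reset the list of changed params each time a new payload is attempted
--     # changedParams = []
--
--     return all_modded_params
-- ===== SOURCE B (Python) =====
-- def change_params(params, payload):
--     """Returns a list of complete parameters, each with 1 parameter changed to an XSS vector"""
--     # First pass: indices of the first occurrence of each distinct param name
--     seen = set()
--     targets = []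
--     for i, (name, _value) in enumerate(params):
--         if name not in seen:
--             seen.add(name)
--             targets.append(i)
--     # Second pass: one variant per outer step; variant x injects at targets[x] (if any)
--     variants = []
--     for x in range(len(params)):
--         variant = list(params)
--         if x < len(targets):
--             j = targets[x]
--             name, value = variant[j]
--             variant[j] = (name, value + payload)
--         variants.append(variant)
--     return {payload: variants}
-- ===== Notes on version B (the rewrite author's own statement) =====
-- stated objective: faster
-- what changed: Replaces A's interleaved nested loop (which rescans the growing changed-name list for every parameter in every outer pass) with a two-pass decomposition: one scan collects the first-occurrence index of each distinct name into a targets table, then each variant is built by a single positional injection at targets[x].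
import Mathlib
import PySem

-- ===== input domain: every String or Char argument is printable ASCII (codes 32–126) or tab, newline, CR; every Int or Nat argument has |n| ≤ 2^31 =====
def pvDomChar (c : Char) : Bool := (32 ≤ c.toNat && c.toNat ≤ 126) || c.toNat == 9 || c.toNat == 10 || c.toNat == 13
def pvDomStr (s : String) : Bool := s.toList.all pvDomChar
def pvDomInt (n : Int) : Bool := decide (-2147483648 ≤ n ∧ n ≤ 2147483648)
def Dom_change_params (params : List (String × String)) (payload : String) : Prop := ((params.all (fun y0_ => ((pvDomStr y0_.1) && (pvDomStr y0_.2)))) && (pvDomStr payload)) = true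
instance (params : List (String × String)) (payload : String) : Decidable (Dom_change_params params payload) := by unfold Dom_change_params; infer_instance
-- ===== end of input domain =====

-- B replaces A's interleaved name-membership inner scan by a two-pass decomposition:
-- first collect the first-occurrence index of each distinct name, then build each
-- variant by a single positional injection (faster: no per-element membership scan).

-- ===== PORT A =====
-- inner loop body: 'for p in params: if param not in changed_params and changed_param == False: …'
-- state = (changed_params, changed_param (False=none), modded_params)
def pvInnerStepA (payload : String)
    (s : List String × Option String × List (String × String)) (p : String × String) :
    List String × Option String × List (String × String) :=
  if !s.1.contains p.1 && s.2.1.isNone then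
    (s.1 ++ [p.1], some p.1, s.2.2 ++ [(p.1, p.2 ++ payload)])
  else
    (s.1, s.2.1, s.2.2 ++ [p])

-- outer loop body: one pass over params, then append modded_params and reset
def pvOuterStepA (params : List (String × String)) (payload : String)
    (st : List String × List (List (String × String))) (_x : Int) :
    List String × List (List (String × String)) :=
  let inner := params.foldl (pvInnerStepA payload) (st.1, none, [])
  (inner.1, st.2 ++ [inner.2.2])

def change_params (params : List (String × String)) (payload : String) :
    List (String × List (List (String × String))) :=
  -- all_modded_params = {payload: []}; for x in range(0, len(params)): …  (appending modded_params each pass)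
  [(payload, ((PySem.List.pyRange 0 (PySem.List.len params) 1).foldl
      (pvOuterStepA params payload) ([], [])).2)]

-- ===== PORT B =====
-- first pass of Source B: seen = set(); targets = first-occurrence indices
def pvTargetStepB (s : PySem.Set String × List Nat) (pi : (String × String) × Nat) :
    PySem.Set String × List Nat :=
  if PySem.Set.contains s.1 pi.1.1 then s
  else (PySem.Set.add s.1 pi.1.1, s.2 ++ [pi.2])

-- second pass of Source B: variant x = params with position targets[x] injected (if x < len(targets))
def pvVariantB (params : List (String × String)) (payload : String) (t : Option Nat) :
    List (String × String) :=
  match t with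
  | some j =>
    match params[j]? with
    | some (n, v) => params.set j (n, v ++ payload)
    | none => params
  | none => params

def change_params_alt (params : List (String × String)) (payload : String) :
    List (String × List (List (String × String))) :=
  -- targets = first-occurrence indices; variants = one injected copy per x
  [(payload, (List.range params.length).map (fun x =>
      pvVariantB params payload ((params.zipIdx.foldl pvTargetStepB (PySem.Set.empty, [])).2)[x]?))]

-- ===== PRECONDITION & SPEC =====
def Spec_change_params (params : List (String × String)) (payload : String) (out : List (String × List (List (String × String)))) : Prop := out = change_params_alt params payload
instance (params : List (String × String)) (payload : String) (out : List (String × List (List (String × String)))) : Decidable (Spec_change_params params payload out) := by unfold Spec_change_params; infer_instance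

-- ===== CLAIM (what is proved, stated in full; the proofs are below) =====
def Claim_equal_change_params : Prop := ∀ (params : List (String × String)) (payload : String), Dom_change_params params payload → Spec_change_params params payload (change_params params payload)

-- ===== LEMMAS AND PROOFS =====

-- indices of the first occurrence of each name not yet in `seen`, counting from i
def pvTgts (seen : List String) : List (String × String) → Nat → List Nat
  | [], _ => []
  | p :: ps, i =>
    if seen.contains p.1 then pvTgts seen ps (i + 1)
    else i :: pvTgts (seen ++ [p.1]) ps (i + 1)

-- B's first pass computes pvTgts
theorem pvTargets_eq (ps : List (String × String)) (i : Nat) (seen : List String) (ts : List Nat) :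
    ((ps.zipIdx i).foldl pvTargetStepB (seen, ts)).2 = ts ++ pvTgts seen ps i := by
  induction ps generalizing i seen ts with
  | nil => simp [pvTgts]
  | cons p ps ih =>
    simp only [List.zipIdx_cons, List.foldl_cons, pvTargetStepB, pvTgts]
    by_cases hm : p.1 ∈ seen
    · simp [hm, ih]
    · simp [hm, PySem.Set.add, PySem.Set.contains, ih, List.append_assoc]

-- once changed_param is set, the inner loop only appends
theorem pvInnerA_done (payload : String) (ps : List (String × String))
    (cps : List String) (n : String) (mod : List (String × String)) :
    ps.foldl (pvInnerStepA payload) (cps, some n, mod) = (cps, some n, mod ++ ps) := by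
  induction ps generalizing mod with
  | nil => simp
  | cons p ps ih => simp [pvInnerStepA, ih, List.append_assoc]

-- characterisation of one inner pass of A in terms of pvTgts
theorem pvInnerA_char (payload : String) (ps : List (String × String))
    (cps : List String) (mod : List (String × String)) (i : Nat) :
    (pvTgts cps ps i = [] →
      ps.foldl (pvInnerStepA payload) (cps, none, mod) = (cps, none, mod ++ ps)) ∧
    (∀ j rest, pvTgts cps ps i = j :: rest →
      i ≤ j ∧ ∃ n v, ps[j - i]? = some (n, v) ∧
        ps.foldl (pvInnerStepA payload) (cps, none, mod)
          = (cps ++ [n], some n, mod ++ ps.set (j - i) (n, v ++ payload)) ∧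
        pvTgts (cps ++ [n]) ps i = rest) := by
  induction ps generalizing cps mod i with
  | nil => exact ⟨fun _ => by simp, fun j rest h => by simp [pvTgts] at h⟩
  | cons p ps ih =>
    by_cases hc : cps.contains p.1
    · have hm : p.1 ∈ cps := by simpa using hc
      have hstep : pvInnerStepA payload (cps, none, mod) p = (cps, none, mod ++ [p]) := by
        simp [pvInnerStepA, hm]
      constructor
      · intro h
        simp only [pvTgts, if_pos hc] at h
        simp only [List.foldl_cons, hstep]
        rw [(ih cps (mod ++ [p]) (i + 1)).1 h]
        simp
      · intro j rest h
        simp only [pvTgts, if_pos hc] at h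
        obtain ⟨hij, n, v, hget, hfold, hrest⟩ := (ih cps (mod ++ [p]) (i + 1)).2 j rest h
        refine ⟨by omega, n, v, ?_, ?_, ?_⟩
        · have : j - i = (j - (i + 1)) + 1 := by omega
          rw [this, List.getElem?_cons_succ]; exact hget
        · simp only [List.foldl_cons, hstep, hfold]
          have : j - i = (j - (i + 1)) + 1 := by omega
          rw [this, List.set_cons_succ]
          simp
        · have hc' : (cps ++ [n]).contains p.1 := by
            have hm : p.1 ∈ cps := by simpa using hc
            simp [hm]
          simp only [pvTgts, if_pos hc']
          exact hrest
    · have hm : p.1 ∉ cps := by simpa using hc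
      have hstep : pvInnerStepA payload (cps, none, mod) p
        = (cps ++ [p.1], some p.1, mod ++ [(p.1, p.2 ++ payload)]) := by
        simp [pvInnerStepA, hm]
      constructor
      · intro h
        simp only [pvTgts, if_neg hc] at h
        exact (List.cons_ne_nil _ _ h).elim
      · intro j rest h
        simp only [pvTgts, if_neg hc] at h
        obtain ⟨hj, hrest⟩ := List.cons.inj h
        subst hj
        refine ⟨le_refl i, p.1, p.2, ?_, ?_, ?_⟩
        · simp
        · simp only [List.foldl_cons, hstep, pvInnerA_done]
          simp
        · have hc' : (cps ++ [p.1]).contains p.1 := by simp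
          simp only [pvTgts, if_pos hc']
          exact hrest.symm ▸ rfl

-- B's variants, written as a recursion on the target list and a step count
def pvBvar (params : List (String × String)) (payload : String) :
    List Nat → Nat → List (List (String × String))
  | _, 0 => []
  | [], m + 1 => params :: pvBvar params payload [] m
  | j :: rest, m + 1 => pvVariantB params payload (some j) :: pvBvar params payload rest m

theorem pvBvar_eq_map (params : List (String × String)) (payload : String)
    (m : Nat) (ts : List Nat) :
    (List.range m).map (fun x => pvVariantB params payload ts[x]?)
      = pvBvar params payload ts m := by
  induction m generalizing ts with
  | zero => simp [pvBvar]
  | succ m ih =>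
    rw [List.range_succ_eq_map, List.map_cons, List.map_map]
    have h1 : ((fun x => pvVariantB params payload ts[x]?) ∘ Nat.succ)
        = fun x => pvVariantB params payload ts.tail[x]? := by
      funext x; cases ts <;> simp
    rw [h1]
    cases ts with
    | nil => simp only [List.tail_nil]; rw [ih]; simp [pvBvar, pvVariantB]
    | cons j rest => simp only [List.tail_cons]; rw [ih]; simp [pvBvar]

-- A's outer loop produces exactly pvBvar over pvTgts
theorem pvOuterA_eq (params : List (String × String)) (payload : String)
    (l : List Int) (cps : List String) (acc : List (List (String × String))) :
    (l.foldl (pvOuterStepA params payload) (cps, acc)).2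
      = acc ++ pvBvar params payload (pvTgts cps params 0) l.length := by
  induction l generalizing cps acc with
  | nil => simp [pvBvar]
  | cons a l ih =>
    simp only [List.foldl_cons, List.length_cons]
    cases hts : pvTgts cps params 0 with
    | nil =>
      have hin := (pvInnerA_char payload params cps [] 0).1 hts
      simp only [pvOuterStepA, hin]
      rw [ih]
      simp [hts, pvBvar]
    | cons j rest =>
      obtain ⟨_, n, v, hget, hfold, hrest⟩ := (pvInnerA_char payload params cps [] 0).2 j rest hts
      simp only [Nat.sub_zero] at hget hfold
      simp only [pvOuterStepA, hfold]
      rw [ih]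
      simp only [hrest, pvBvar, pvVariantB, hget]
      simp

-- ===== VERDICT (by name: the statement is the Claim_ definition above) =====
theorem change_params_spec : Claim_equal_change_params := by
  intro params payload _
  show change_params params payload = change_params_alt params payload
  show [(payload, ((PySem.List.pyRange 0 (PySem.List.len params) 1).foldl
      (pvOuterStepA params payload) ([], [])).2)]
    = [(payload, (List.range params.length).map (fun x =>
      pvVariantB params payload ((params.zipIdx.foldl pvTargetStepB (PySem.Set.empty, [])).2)[x]?))]
  have hlen : (PySem.List.pyRange 0 (PySem.List.len params) 1).length = params.length := by
    simp [PySem.List.length_pyRange_one]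
  rw [pvOuterA_eq params payload _ [] [], hlen]
  simp only [pvTargets_eq, List.nil_append]
  rw [pvBvar_eq_map]
  rfl
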